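-- pv_equiv track=rewrite | github.com/aorursy/KT_dataset_py | lucasmascena_exercise-loops-and-list-comprehensions.py | has_lucky_number
-- ===== SOURCE A (Python) =====
-- def has_lucky_number(nums):
--
--     """Return whether the given list of numbers is lucky. A lucky list contains
--
--     at least one number divisible by 7.
--
--     """
--
--     list = [True for num in nums
--
--             if num % 7 == 0]
--
--     i = 0
--
--     '''for num in nums:
--
--         if num % 7 == 0:
--
--             list.append(True)
--
--         else:
--
--             list.append(False)'''
--
--     for l in list:
--
--         if l == True:
--
--             i += 1
--
--         else:
--
--             pass
--
--     return True if i>0 else False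
-- ===== SOURCE B (Python) =====
-- def has_lucky_number(nums):
--     """Return whether the given list of numbers is lucky. A lucky list contains
--     at least one number divisible by 7.
--     """
--     if len(nums) == 0:
--         return False
--     if len(nums) == 1:
--         return nums[0] % 7 == 0
--     mid = len(nums) // 2
--     return has_lucky_number(nums[:mid]) or has_lucky_number(nums[mid:])
-- ===== Notes on version B (the rewrite author's own statement) =====
-- stated objective: alternative
-- what changed: Replaced A's build-a-list-of-Trues-then-count-then-compare pipeline with a divide-and-conquer recursion that splits the list in half and ORs the two recursive answers (base cases: empty list, singleton).
import Mathlib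
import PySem

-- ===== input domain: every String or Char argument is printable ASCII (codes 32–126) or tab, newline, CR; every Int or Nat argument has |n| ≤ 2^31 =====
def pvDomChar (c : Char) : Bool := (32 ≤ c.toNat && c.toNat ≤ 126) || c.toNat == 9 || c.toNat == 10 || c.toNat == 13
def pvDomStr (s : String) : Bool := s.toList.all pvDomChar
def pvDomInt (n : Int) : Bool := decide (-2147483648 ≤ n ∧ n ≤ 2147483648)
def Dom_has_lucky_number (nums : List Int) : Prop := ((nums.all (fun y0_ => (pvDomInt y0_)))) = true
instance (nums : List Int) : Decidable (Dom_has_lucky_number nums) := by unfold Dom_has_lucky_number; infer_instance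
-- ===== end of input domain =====

-- B replaces A's build-list-of-Trues, count, compare-to-zero pipeline with a divide-and-conquer
-- recursion on list halves (alternative structure, not claimed faster).

-- ===== PORT A =====
-- list comprehension [True for num in nums if num % 7 == 0], then count the Trues, then i > 0
def has_lucky_number (nums : List Int) : Bool :=
  let list : List Bool := (nums.filter (fun num => PySem.Int.mod num 7 = 0)).map (fun _ => true)
  let i : Int := list.foldl (fun i l => if l = true then i + 1 else i) 0
  if i > 0 then true else false

-- ===== PORT B =====
-- nums[:mid] / nums[mid:] with 0 ≤ mid ≤ len are exactly List.take / List.drop;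
-- len(nums)//2 on a nonnegative length is Nat division; nums[0] on a singleton is headI.
-- The fuel parameter (initialised to nums.length) only makes the divide-and-conquer
-- recursion structural; it never changes the value (each half is strictly shorter).
def pvAltGo (fuel : Nat) (nums : List Int) : Bool :=
  match fuel with
  | 0 => false
  | f + 1 =>
    if nums.length = 0 then false
    else if nums.length = 1 then decide (PySem.Int.mod nums.headI 7 = 0)
    else
      let mid := nums.length / 2
      pvAltGo f (nums.take mid) || pvAltGo f (nums.drop mid)

def has_lucky_number_alt (nums : List Int) : Bool :=
  pvAltGo nums.length nums

-- ===== PRECONDITION & SPEC =====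
def Spec_has_lucky_number (nums : List Int) (out : Bool) : Prop := out = has_lucky_number_alt nums
instance (nums : List Int) (out : Bool) : Decidable (Spec_has_lucky_number nums out) := by unfold Spec_has_lucky_number; infer_instance

-- ===== CLAIM (what is proved, stated in full; the proofs are below) =====
def Claim_equal_has_lucky_number : Prop := ∀ (nums : List Int), Dom_has_lucky_number nums → Spec_has_lucky_number nums (has_lucky_number nums)

-- ===== LEMMAS AND PROOFS =====
-- A's counter over the list of Trues equals its length
theorem pv_count_lemma {α : Type} (xs : List α) (k : Int) :
    (xs.map (fun _ => true)).foldl (fun i l => if l = true then i + 1 else i) k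
      = k + xs.length := by
  induction xs generalizing k with
  | nil => simp
  | cons x t ih =>
    simp only [List.map, List.foldl, ih, List.length_cons]
    push_cast; ring

-- B's divide-and-conquer computes List.any of the divisibility test (given enough fuel)
theorem pv_go_eq_any (fuel : Nat) (nums : List Int) (hf : nums.length ≤ fuel) :
    pvAltGo fuel nums = nums.any (fun num => decide (PySem.Int.mod num 7 = 0)) := by
  induction fuel generalizing nums with
  | zero =>
    have : nums = [] := List.length_eq_zero_iff.mp (Nat.le_zero.mp hf)
    simp [this, pvAltGo]
  | succ f ih =>
    rw [pvAltGo]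
    by_cases h0 : nums.length = 0
    · have : nums = [] := List.length_eq_zero_iff.mp h0
      simp [this]
    · by_cases h1 : nums.length = 1
      · obtain ⟨a, rfl⟩ := List.length_eq_one_iff.mp h1
        simp [List.headI]
      · rw [if_neg h0, if_neg h1]
        show (pvAltGo f (nums.take (nums.length / 2)) || pvAltGo f (nums.drop (nums.length / 2)))
            = nums.any fun num => decide (PySem.Int.mod num 7 = 0)
        rw [
          ih (nums.take (nums.length / 2)) (by simp [List.length_take]; omega),
          ih (nums.drop (nums.length / 2)) (by simp [List.length_drop]; omega),
          ← List.any_append, List.take_append_drop]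

theorem pv_alt_eq_any (nums : List Int) :
    has_lucky_number_alt nums = nums.any (fun num => decide (PySem.Int.mod num 7 = 0)) :=
  pv_go_eq_any nums.length nums le_rfl

-- A computes List.any of the divisibility test
theorem pv_a_eq_any (nums : List Int) :
    has_lucky_number nums = nums.any (fun num => decide (PySem.Int.mod num 7 = 0)) := by
  unfold has_lucky_number
  simp only [pv_count_lemma, zero_add]
  rcases hA : nums.any (fun num => decide (PySem.Int.mod num 7 = 0)) with _ | _
  · have hfil : nums.filter (fun num => decide (PySem.Int.mod num 7 = 0)) = [] :=
      List.filter_eq_nil_iff.mpr (fun a ha => by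
        have := List.any_eq_false.mp hA a ha
        simpa using this)
    rw [hfil]; decide
  · obtain ⟨a, ha, hpa⟩ := List.any_eq_true.mp hA
    have hpos : 0 < (nums.filter (fun num => decide (PySem.Int.mod num 7 = 0))).length :=
      List.length_pos_iff.mpr (fun hn => by
        exact absurd hpa (by simpa using List.filter_eq_nil_iff.mp hn a ha))
    rw [if_pos (by exact_mod_cast hpos)]

-- ===== VERDICT (by name: the statement is the Claim_ definition above) =====
theorem has_lucky_number_spec : Claim_equal_has_lucky_number := by
  intro nums _
  unfold Spec_has_lucky_number
  rw [pv_a_eq_any, pv_alt_eq_any]
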